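-- pv_equiv track=rewrite | github.com/DariaVolodina/Python_GB_education | seminar05/TASK02.py | range_nums
-- ===== SOURCE A (Python) =====
-- def range_nums (list: list):
--     my_list = []
--     for i in range(len(list)):
--         f = list[i]
--         list1 = [f]
--         for x in range(i+1, len(list)):
--             if list[x] > f:
--                 f = list[x]
--                 list1.append(f)
--         if len(list1) > 1:
--             my_list.append(list1)
--     return my_list
-- ===== SOURCE B (Python) =====
-- def range_nums(list):
--     # two-pass per start: running-max accumulation, then compress consecutive duplicates
--     result = []
--     for i in range(len(list)):
--         acc = []
--         m = list[i]
--         for x in list[i:]: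
--             m = m if m > x else x
--             acc.append(m)
--         rec = [acc[0]] + [b for a, b in zip(acc, acc[1:]) if b > a]
--         if len(rec) > 1:
--             result.append(rec)
--     return result
-- ===== Notes on version B (the rewrite author's own statement) =====
-- stated objective: alternative
-- what changed: Replaces A's conditional-append record loop with a two-pass decomposition per start index: first build the running-maximum table of the suffix, then compress consecutive duplicates with a zip-based pairwise comparison.
import Mathlib
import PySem

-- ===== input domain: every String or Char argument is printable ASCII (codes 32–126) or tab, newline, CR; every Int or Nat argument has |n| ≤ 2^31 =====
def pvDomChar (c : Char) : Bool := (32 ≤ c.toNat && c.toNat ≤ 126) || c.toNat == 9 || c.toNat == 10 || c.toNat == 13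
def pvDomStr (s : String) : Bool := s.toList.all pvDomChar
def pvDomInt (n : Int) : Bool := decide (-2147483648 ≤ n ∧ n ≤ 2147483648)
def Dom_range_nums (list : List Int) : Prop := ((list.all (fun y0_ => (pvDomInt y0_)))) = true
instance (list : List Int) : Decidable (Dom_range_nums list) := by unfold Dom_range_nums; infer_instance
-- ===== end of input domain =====

-- B changes the decomposition (running-max table, then pairwise compression); equal return value proved below.

-- ===== PORT A =====
def range_nums (list : List Int) : List (List Int) :=
  (PySem.List.pyRange 0 (list.length : Int) 1).foldl (fun my_list i =>
    let f := PySem.List.pyGetD list i 0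
    let st := (PySem.List.pyRange (i+1) (list.length : Int) 1).foldl
      (fun (p : Int × List Int) x =>
        let v := PySem.List.pyGetD list x 0
        if v > p.1 then (v, p.2 ++ [v]) else p) (f, [f])
    if st.2.length > 1 then my_list ++ [st.2] else my_list) []

-- ===== PORT B =====
def range_nums_alt (list : List Int) : List (List Int) :=
  (PySem.List.pyRange 0 (list.length : Int) 1).foldl (fun result i =>
    let acc := ((PySem.List.slice list (some i) none).foldl
      (fun (p : Int × List Int) x =>
        let m := if p.1 > x then p.1 else x
        (m, p.2 ++ [m])) (PySem.List.pyGetD list i 0, ([] : List Int))).2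
    let rec1 := [PySem.List.pyGetD acc 0 0] ++
      ((acc.zip (PySem.List.slice acc (some 1) none)).filter (fun p => p.2 > p.1)).map (fun p => p.2)
    if rec1.length > 1 then result ++ [rec1] else result) []

-- ===== PRECONDITION & SPEC =====
def Spec_range_nums (list : List Int) (out : List (List Int)) : Prop := out = range_nums_alt list
instance (list : List Int) (out : List (List Int)) : Decidable (Spec_range_nums list out) := by unfold Spec_range_nums; infer_instance

-- ===== CLAIM (what is proved, stated in full; the proofs are below) =====
def Claim_equal_range_nums : Prop := ∀ (list : List Int), Dom_range_nums list → Spec_range_nums list (range_nums list)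

-- ===== LEMMAS AND PROOFS =====

/-- strictly-increasing record list of `t` above the running bound `f` -/
def recsOf (f : Int) : List Int → List Int
  | [] => []
  | x :: t => if x > f then x :: recsOf x t else recsOf f t

/-- running maximum of `t` seeded with `m` (Python's `m = m if m > x else x`) -/
def rmOf (m : Int) : List Int → List Int
  | [] => []
  | x :: t => (if m > x then m else x) :: rmOf (if m > x then m else x) t

/-- consecutive-duplicate compression keyed on previous element `a` -/
def cdedOf (a : Int) : List Int → List Int
  | [] => []
  | x :: t => (if x > a then [x] else []) ++ cdedOf x t

theorem foldA_recs (t : List Int) (f : Int) (l : List Int) :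
    (t.foldl (fun (p : Int × List Int) v =>
      if v > p.1 then (v, p.2 ++ [v]) else p) (f, l)).2 = l ++ recsOf f t := by
  induction t generalizing f l with
  | nil => simp [recsOf]
  | cons x t ih =>
    simp only [List.foldl_cons, recsOf]
    by_cases h : x > f
    · simp [h, ih]
    · simp [h, ih]

theorem foldB_rm (t : List Int) (m : Int) (l : List Int) :
    (t.foldl (fun (p : Int × List Int) x =>
      (if p.1 > x then p.1 else x, p.2 ++ [if p.1 > x then p.1 else x])) (m, l)).2
      = l ++ rmOf m t := by
  induction t generalizing m l with
  | nil => simp [rmOf]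
  | cons x t ih => simp [rmOf, ih]

theorem zip_filter_cded (a : Int) (rest : List Int) :
    ((((a :: rest).zip rest).filter (fun p => p.2 > p.1)).map (fun p => p.2)) = cdedOf a rest := by
  induction rest generalizing a with
  | nil => simp [cdedOf]
  | cons x t ih =>
    simp only [List.zip_cons_cons, List.filter_cons, cdedOf]
    by_cases h : x > a
    · simp [h, ih]
    · simp [h, ih]

theorem cded_rm_recs (t : List Int) (f : Int) :
    cdedOf f (rmOf f t) = recsOf f t := by
  induction t generalizing f with
  | nil => simp [rmOf, cdedOf, recsOf]
  | cons x t ih =>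
    simp only [rmOf, cdedOf, recsOf]
    by_cases h : x > f
    · have hm : (if f > x then f else x) = x := by omega
      simp [hm, h, ih]
    · have hm : (if f > x then f else x) = f := by omega
      simp [hm, h, ih]

theorem range_nums_spec_aux (list : List Int) :
    range_nums list = range_nums_alt list := by
  unfold range_nums range_nums_alt
  apply PySem.List.foldl_congr_mem
  intro acc i hi
  rw [PySem.List.mem_pyRange_one] at hi
  obtain ⟨h0, hn⟩ := hi
  have hlt : i.toNat < list.length := by omega
  have hcast : i = (i.toNat : Int) := by omega
  -- A's inner index loop over range(i+1, n) = fold over drop (i+1)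
  have hA := PySem.List.foldl_pyRange_pyGetD' (a := i+1) list 0
      (fun (p : Int × List Int) v => if v > p.1 then (v, p.2 ++ [v]) else p)
      (PySem.List.pyGetD list i 0, [PySem.List.pyGetD list i 0]) (by omega)
  simp only [hA]
  -- B's slice list[i:]
  rw [PySem.List.slice_from list h0]
  have hdropsucc : (i+1).toNat = i.toNat + 1 := by omega
  have hget : PySem.List.pyGetD list i 0 = list[i.toNat] :=
    PySem.List.pyGetD_eq_getElem list 0 h0 (by simpa using hn)
  have hdrop : list.drop i.toNat = list[i.toNat] :: list.drop (i.toNat + 1) :=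
    (List.getElem_cons_drop hlt).symm
  set f := list[i.toNat] with hf
  set t := list.drop (i.toNat + 1) with ht
  rw [hget, hdropsucc, hdrop]
  -- evaluate both inner folds structurally
  rw [← ht]
  rw [foldA_recs t f [f]]
  have hBfold : ((f :: t).foldl (fun (p : Int × List Int) x =>
      (if p.1 > x then p.1 else x, p.2 ++ [if p.1 > x then p.1 else x])) (f, [])).2
      = f :: rmOf f t := by
    rw [foldB_rm (f :: t) f []]
    show [] ++ rmOf f (f :: t) = f :: rmOf f t
    simp [rmOf]
  rw [hBfold]
  rw [PySem.List.slice_from_one]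
  simp only [List.tail_cons, PySem.List.pyGetD_zero_cons]
  rw [zip_filter_cded f (rmOf f t), cded_rm_recs t f]

-- ===== VERDICT (by name: the statement is the Claim_ definition above) =====
theorem range_nums_spec : Claim_equal_range_nums := by
  intro list _
  unfold Spec_range_nums
  exact range_nums_spec_aux list
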